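-- pv_equiv track=rewrite | github.com/Dankoozie/fivebit | fivebit.py | decode
-- ===== SOURCE A (Python) =====
-- def drawchars(byte,nbits,nbitsl):
--     tot = 8 + nbitsl
--     itot = (nbits << 8) | byte
--     if(tot < 10):
--         c1 = itot >> (tot - 5) & 31
--         newnbits = itot & (2**(tot -5) -1)
--         newnbitsl = tot - 5
--         return(([c1],newnbits,newnbitsl))
--     elif(tot > 9):
--          c1 = itot >> (tot - 5) & 31
--          c2 = itot >> (tot - 10) & 31
--          newnbits = itot & (2**(tot - 10)-1)
--          newnbitsl = tot - 10
--          return(([c1,c2],newnbits,newnbitsl))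
--
-- def decode(string):
--     bs = bytes(string)
--     nbl = 0
--     nbs = 0
--     ls = []
--     ns = None
--     as_num = 0
--     lastbit = b''
--     #Try to get 5 bytes at a time first for a while
--     for b in range(int(len(bs)/5)):
--         as_num = as_num.from_bytes(bs[b*5:(b*5)+5],'big')
--         ls.extend([as_num >> 35, (as_num >> 30) & 31, (as_num >> 25) & 31, (as_num >> 20) & 31, (as_num >> 15) & 31, (as_num >> 10) & 31, (as_num >> 5) & 31, as_num & 31])
--
--     if(len(bs) % 5 > 0): #Catch remaining characters
--         lastbit = bs[0-(len(bs)%5):]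
--
--         for a in lastbit:
--             rs = drawchars(a,nbs,nbl)
--             nbs = rs[1]
--             nbl = rs[2]
--             ls.extend(rs[0])
--     return ls
-- ===== SOURCE B (Python) =====
-- def decode(string):
--     bs = bytes(string)
--     num = int.from_bytes(bs, 'big')
--     total_bits = 8 * len(bs)
--     return [(num >> (total_bits - 5 * (i + 1))) & 31 for i in range(total_bits // 5)]
-- ===== Notes on version B (the rewrite author's own statement) =====
-- stated objective: simpler
-- what changed: Replaces A's two-phase design (5-byte block loop emitting 8 values plus a stateful per-byte carry helper for the remainder) by one uniform pass: build a single big-endian integer from all bytes and extract each 5-bit chunk by its position; the helper disappears.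
import Mathlib
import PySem

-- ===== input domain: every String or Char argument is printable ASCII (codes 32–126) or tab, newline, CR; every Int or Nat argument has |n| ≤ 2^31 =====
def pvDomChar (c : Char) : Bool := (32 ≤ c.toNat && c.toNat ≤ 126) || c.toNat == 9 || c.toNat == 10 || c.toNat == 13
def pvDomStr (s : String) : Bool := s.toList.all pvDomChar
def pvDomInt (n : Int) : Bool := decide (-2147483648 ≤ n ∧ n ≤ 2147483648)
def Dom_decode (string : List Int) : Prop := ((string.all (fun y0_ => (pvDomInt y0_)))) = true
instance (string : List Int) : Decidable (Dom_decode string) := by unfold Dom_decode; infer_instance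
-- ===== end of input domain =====

-- B changes A's two-phase block+carry decoding into one pass over a single big-endian integer; objective: simpler.
-- On inputs with an entry outside 0..255 both Pythons raise ValueError in bytes(string); Pre_ excludes exactly those.

-- ===== PORT A =====
-- int.from_bytes(bs, 'big') for a byte list: fold acc*256 + byte (exact)
def intFromBytes (bs : List Int) : Int := bs.foldl (fun a b => a * 256 + b) 0

-- drawchars: '>> k' ported as '/ 2^k', '& 31' as '% 32', '& (2^k - 1)' as '% 2^k' —
-- exact for the nonnegative itot that Pre_'s byte range guarantees.
def drawchars (byte nbits nbitsl : Int) : List Int × Int × Int :=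
  let tot := 8 + nbitsl
  let itot := nbits * 256 + byte
  if tot < 10 then
    ([itot / 2 ^ (tot - 5).toNat % 32], itot % 2 ^ (tot - 5).toNat, tot - 5)
  else
    ([itot / 2 ^ (tot - 5).toNat % 32, itot / 2 ^ (tot - 10).toNat % 32],
      itot % 2 ^ (tot - 10).toNat, tot - 10)

-- the block loop 'for b in range(int(len(bs)/5))' with its ls accumulator
def blockLoop (bs : List Int) : List Int :=
  (PySem.List.pyRange 0 ((bs.length : Int) / 5) 1).foldl
    (fun ls b =>
      let as_num := intFromBytes (PySem.List.slice bs (some (b * 5)) (some (b * 5 + 5)))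
      ls ++ [as_num / 2 ^ 35, as_num / 2 ^ 30 % 32, as_num / 2 ^ 25 % 32, as_num / 2 ^ 20 % 32,
             as_num / 2 ^ 15 % 32, as_num / 2 ^ 10 % 32, as_num / 2 ^ 5 % 32, as_num % 32]) []

-- the remainder loop 'for a in lastbit' carrying (nbs, nbl, ls)
def remLoop (l : List Int) (st : Int × Int × List Int) : Int × Int × List Int :=
  l.foldl (fun st a =>
    let rs := drawchars a st.1 st.2.1
    (rs.2.1, rs.2.2, st.2.2 ++ rs.1)) st

def decode (string : List Int) : List Int :=
  let bs := string
  let n : Int := (bs.length : Int)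
  let ls := blockLoop bs
  if n % 5 > 0 then
    (remLoop (PySem.List.slice bs (some (0 - n % 5)) none) (0, 0, ls)).2.2
  else ls

-- ===== PORT B =====
-- '>> k' ported as '/ 2^k', '& 31' as '% 32': exact for the nonnegative num Pre_ guarantees.
def decode_alt (string : List Int) : List Int :=
  let num := intFromBytes string
  let total_bits : Int := 8 * (string.length : Int)
  (PySem.List.pyRange 0 (total_bits / 5) 1).map
    (fun i => num / 2 ^ (total_bits - 5 * (i + 1)).toNat % 32)

-- ===== PRECONDITION & SPEC =====
-- Pre_ excludes inputs with an entry outside 0..255: there Python's bytes(string) raises ValueError in both A and B.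
def Pre_decode (string : List Int) : Prop := ∀ x ∈ string, 0 ≤ x ∧ x < 256
instance (string : List Int) : Decidable (Pre_decode string) := by unfold Pre_decode; infer_instance

def pvWitness_decode : List Int := [7, 250, 3, 0, 255, 17, 99]

def Spec_decode (string : List Int) (out : List Int) : Prop := out = decode_alt string
instance (string : List Int) (out : List Int) : Decidable (Spec_decode string out) := by unfold Spec_decode; infer_instance

-- ===== CLAIM (what is proved, stated in full; the proofs are below) =====
def Claim_equal_decode : Prop := ∀ (string : List Int), Dom_decode string → Pre_decode string → Spec_decode string (decode string)

-- ===== LEMMAS AND PROOFS =====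
-- Both ports are shown equal to decodeSpec, which peels full 5-byte blocks and then
-- handles the ≤4-byte tail in closed form.

theorem valInit (t : List Int) : ∀ s : Int,
    t.foldl (fun a b => a * 256 + b) s = s * 256 ^ t.length + intFromBytes t := by
  induction t with
  | nil => intro s; simp [intFromBytes]
  | cons x t ih =>
    intro s
    simp only [List.foldl_cons, List.length_cons, intFromBytes]
    rw [ih (s * 256 + x), ih (0 * 256 + x)]
    ring

theorem val_nonneg (t : List Int) (h : ∀ x ∈ t, 0 ≤ x ∧ x < 256) : 0 ≤ intFromBytes t := by
  induction t with
  | nil => simp [intFromBytes]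
  | cons x t ih =>
    have hx := h x (by simp)
    have ht := ih (fun y hy => h y (by simp [hy]))
    simp only [intFromBytes, List.foldl_cons] at ht ⊢
    rw [valInit]
    have hp : (0:Int) ≤ 256 ^ t.length := by positivity
    simp only [intFromBytes] at *
    nlinarith

theorem val_lt (t : List Int) (h : ∀ x ∈ t, 0 ≤ x ∧ x < 256) :
    intFromBytes t < 2 ^ (8 * t.length) := by
  have h256 : (2:Int) ^ (8 * t.length) = 256 ^ t.length := by rw [pow_mul]; norm_num
  rw [h256]
  induction t with
  | nil => simp [intFromBytes]
  | cons x t ih =>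
    have hx := h x (by simp)
    have ht := ih (fun y hy => h y (by simp [hy])) (by rw [pow_mul]; norm_num)
    have ht0 : 0 ≤ intFromBytes t := val_nonneg t (fun y hy => h y (by simp [hy]))
    simp only [intFromBytes, List.foldl_cons, List.length_cons] at ht ht0 ⊢
    rw [valInit]
    have hp : (0:Int) < 256 ^ t.length := by positivity
    simp only [intFromBytes] at *
    rw [pow_succ]
    nlinarith
theorem div_mod_high (a b : Int) (m k : Nat) (hb0 : 0 ≤ b) (hb : b < 2^m) :
    (a * 2^m + b) / 2^(m+k) % 32 = a / 2^k % 32 := by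
  have h2m : (0:Int) < 2^m := by positivity
  rw [pow_add, ← Int.ediv_ediv_of_nonneg (le_of_lt h2m),
    add_comm, Int.add_mul_ediv_right _ _ (ne_of_gt h2m),
    Int.ediv_eq_zero_of_lt hb0 hb, zero_add]
theorem div_mod_low (a b : Int) (m e : Nat) (h : e + 5 ≤ m) :
    (a * 2^m + b) / 2^e % 32 = b / 2^e % 32 := by
  have h2e : (0:Int) < 2^e := by positivity
  obtain ⟨j, rfl⟩ : ∃ j, m = e + 5 + j := ⟨m - e - 5, by omega⟩
  have hsplit : a * 2^(e+5+j) + b = b + (a * 2^j * 32) * 2^e := by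
    rw [pow_add, pow_add]; ring
  rw [hsplit, Int.add_mul_ediv_right _ _ (ne_of_gt h2e)]
  omega

theorem chunk_high (v5 vt : Int) (M : Nat) (E : Int) (c : Nat) (hE : E.toNat = 8*M + c)
    (h0 : 0 ≤ vt) (h1 : vt < 2^(8*M)) :
    (v5 * 2^(8*M) + vt) / 2^E.toNat % 32 = v5 / 2^c % 32 := by
  rw [hE]; exact div_mod_high v5 vt (8*M) c h0 h1

theorem chunk_last (v5 vt : Int) (M : Nat) (E : Int) (hE : E.toNat = 8*M)
    (h0 : 0 ≤ vt) (h1 : vt < 2^(8*M)) :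
    (v5 * 2^(8*M) + vt) / 2^E.toNat % 32 = v5 % 32 := by
  rw [show E.toNat = 8*M + 0 from by omega]
  rw [div_mod_high v5 vt (8*M) 0 h0 h1]; norm_num

theorem chunk_low (v5 vt : Int) (M : Nat) (E E' : Int) (hE : E.toNat = E'.toNat)
    (h5 : E'.toNat + 5 ≤ 8*M) :
    (v5 * 2^(8*M) + vt) / 2^E.toNat % 32 = vt / 2^E'.toNat % 32 := by
  rw [hE]; exact div_mod_low v5 vt (8*M) E'.toNat h5


def blockVals (a b c d e : Int) : List Int :=
  let v := (((a * 256 + b) * 256 + c) * 256 + d) * 256 + e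
  [v / 2 ^ 35 % 32, v / 2 ^ 30 % 32, v / 2 ^ 25 % 32, v / 2 ^ 20 % 32,
   v / 2 ^ 15 % 32, v / 2 ^ 10 % 32, v / 2 ^ 5 % 32, v % 32]

theorem alt_step (a b c d e : Int) (t : List Int) (h : ∀ x ∈ a::b::c::d::e::t, 0 ≤ x ∧ x < 256) :
    decode_alt (a::b::c::d::e::t) = blockVals a b c d e ++ decode_alt t := by
  have hbt : ∀ x ∈ t, 0 ≤ x ∧ x < 256 := fun y hy => h y (by simp [hy])
  have hvt0 : 0 ≤ intFromBytes t := val_nonneg t hbt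
  have hvt1 : intFromBytes t < 2 ^ (8 * t.length) := val_lt t hbt
  have h256 : (256:Int) ^ t.length = 2 ^ (8 * t.length) := by rw [pow_mul]; norm_num
  have hnum : intFromBytes (a::b::c::d::e::t)
      = ((((a * 256 + b) * 256 + c) * 256 + d) * 256 + e) * 2 ^ (8 * t.length) + intFromBytes t := by
    simp only [intFromBytes, List.foldl_cons]
    rw [valInit, h256]
    simp only [intFromBytes]
    ring
  simp only [decode_alt, List.length_cons]
  set M := t.length with hM
  have hlen : ((M + 5 : Nat) : Int) = (M : Int) + 5 := by push_cast; ring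
  rw [hlen]
  have hq : 8 * ((M:Int) + 5) / 5 = 8 + 8 * (M:Int) / 5 := by omega
  rw [hq]
  rw [PySem.List.pyRange_one_append 0 8 (8 + 8 * (M:Int) / 5) (by omega) (by omega)]
  rw [List.map_append]
  congr 1
  · -- first 8 chunks
    have h8 : PySem.List.pyRange 0 8 1 = [0,1,2,3,4,5,6,7] := by decide
    rw [h8]
    simp only [List.map_cons, List.map_nil, blockVals]
    rw [hnum]
    simp only [List.cons.injEq, and_true]
    exact ⟨chunk_high _ _ _ _ 35 (by omega) hvt0 hvt1,
      chunk_high _ _ _ _ 30 (by omega) hvt0 hvt1,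
      chunk_high _ _ _ _ 25 (by omega) hvt0 hvt1,
      chunk_high _ _ _ _ 20 (by omega) hvt0 hvt1,
      chunk_high _ _ _ _ 15 (by omega) hvt0 hvt1,
      chunk_high _ _ _ _ 10 (by omega) hvt0 hvt1,
      chunk_high _ _ _ _ 5 (by omega) hvt0 hvt1,
      chunk_last _ _ _ _ (by omega) hvt0 hvt1⟩
  · -- tail chunks
    rw [PySem.List.pyRange_one 8 (8 + 8 * (M:Int) / 5), PySem.List.pyRange_one 0 (8 * (M:Int) / 5)]
    simp only [List.map_map]
    rw [show (8 + 8 * (M:Int) / 5 - 8) = 8 * (M:Int) / 5 - 0 from by ring]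
    refine List.map_congr_left ?_
    intro k hk
    simp only [List.mem_range] at hk
    simp only [Function.comp_apply]
    rw [hnum]
    refine chunk_low _ _ M _ _ (by omega) (by omega)

def remVals : List Int → List Int
  | [] => []
  | [a] => [a / 2 ^ 3 % 32]
  | [a, b] => [(a * 256 + b) / 2 ^ 11 % 32, (a * 256 + b) / 2 ^ 6 % 32, (a * 256 + b) / 2 ^ 1 % 32]
  | [a, b, c] =>
      let v := (a * 256 + b) * 256 + c
      [v / 2 ^ 19 % 32, v / 2 ^ 14 % 32, v / 2 ^ 9 % 32, v / 2 ^ 4 % 32]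
  | a :: b :: c :: d :: _ =>
      let v := ((a * 256 + b) * 256 + c) * 256 + d
      [v / 2 ^ 27 % 32, v / 2 ^ 22 % 32, v / 2 ^ 17 % 32, v / 2 ^ 12 % 32, v / 2 ^ 7 % 32, v / 2 ^ 2 % 32]

def decodeSpec : List Int → List Int
  | a :: b :: c :: d :: e :: t => blockVals a b c d e ++ decodeSpec t
  | t => remVals t

theorem decode_alt_eq_spec (bs : List Int) (h : ∀ x ∈ bs, 0 ≤ x ∧ x < 256) :
    decode_alt bs = decodeSpec bs := by
  induction bs using decodeSpec.induct with
  | case1 a b c d e t ih =>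
    rw [alt_step a b c d e t h, decodeSpec, ih (fun y hy => h y (by simp [hy]))]
  | case2 t hne =>
    rcases t with _ | ⟨a, _ | ⟨b, _ | ⟨c, _ | ⟨d, _ | ⟨e, t⟩⟩⟩⟩⟩
    · simp [decode_alt, decodeSpec, remVals, PySem.List.pyRange]
    · have h1 : PySem.List.pyRange 0 1 1 = [0] := by decide
      simp [decode_alt, intFromBytes, decodeSpec, remVals, h1]
    · have h1 : PySem.List.pyRange 0 3 1 = [0,1,2] := by decide
      simp [decode_alt, intFromBytes, decodeSpec, remVals, h1]
    · have h1 : PySem.List.pyRange 0 4 1 = [0,1,2,3] := by decide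
      simp [decode_alt, intFromBytes, decodeSpec, remVals, h1]
    · have h1 : PySem.List.pyRange 0 6 1 = [0,1,2,3,4,5] := by decide
      simp [decode_alt, intFromBytes, decodeSpec, remVals, h1]
    · exact absurd rfl (hne a b c d e t)





theorem remLoop_append (l : List Int) : ∀ (s1 s2 : Int) (init : List Int),
    (remLoop l (s1, s2, init)).2.2 = init ++ (remLoop l (s1, s2, [])).2.2 := by
  induction l with
  | nil => intro s1 s2 init; simp [remLoop]
  | cons x l ih =>
    intro s1 s2 init
    simp only [remLoop, List.foldl_cons] at *
    rw [ih _ _ (init ++ (drawchars x s1 s2).1), ih _ _ ([] ++ (drawchars x s1 s2).1)]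
    simp

theorem blockLoop_step (a b c d e : Int) (t : List Int)
    (h : ∀ x ∈ a::b::c::d::e::t, 0 ≤ x ∧ x < 256) :
    blockLoop (a::b::c::d::e::t) = blockVals a b c d e ++ blockLoop t := by
  have hb5 : ∀ x ∈ [a,b,c,d,e], 0 ≤ x ∧ x < 256 := by
    intro x hx; apply h; simp at hx; rcases hx with rfl|rfl|rfl|rfl|rfl <;> simp
  set M := t.length with hM
  simp only [blockLoop, List.length_cons, PySem.List.foldl_append_eq_flatMap, List.nil_append]
  have hq : ((t.length + 1 + 1 + 1 + 1 + 1 : Nat) : Int) / 5 = (t.length : Int) / 5 + 1 := by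
    push_cast; omega
  rw [hq, PySem.List.pyRange_one_cons (by omega)]
  simp only [List.flatMap_cons]
  congr 1
  · -- the first block
    have hsl : PySem.List.slice (a::b::c::d::e::t) (some ((0:Int) * 5)) (some ((0:Int) * 5 + 5))
        = [a,b,c,d,e] := by
      rw [show ((0:Int) * 5) = ((0:Nat):Int) from by norm_num,
          show ((((0:Nat)):Int) + 5) = ((5:Nat):Int) from by norm_num]
      rw [PySem.List.slice_natCast]
      simp
    rw [hsl]
    have hv : intFromBytes [a,b,c,d,e] = (((a * 256 + b) * 256 + c) * 256 + d) * 256 + e := by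
      simp [intFromBytes]
    rw [hv]
    have ha := hb5 a (by simp); have hbb := hb5 b (by simp); have hc := hb5 c (by simp)
    have hd := hb5 d (by simp); have he := hb5 e (by simp)
    simp only [blockVals, List.cons.injEq, and_true]
    norm_num
    omega
  · -- remaining blocks
    rw [show (0:Int) + 1 = 1 from by norm_num]
    rw [PySem.List.pyRange_one 1 ((t.length:Int)/5 + 1), PySem.List.pyRange_one 0 ((t.length:Int)/5)]
    have hrange : (((t.length:Int)/5 + 1) - 1).toNat = (((t.length:Int)/5) - 0).toNat := by omega
    rw [List.flatMap_map, List.flatMap_map, hrange]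
    congr 1
    funext k
    have hs1 : (1 + (k:Int)) * 5 = ((5*k+5 : Nat) : Int) := by push_cast; ring
    have hs2 : ((5*k+5 : Nat) : Int) + 5 = ((5*k+10 : Nat) : Int) := by push_cast; ring
    have ht1 : (0 + (k:Int)) * 5 = ((5*k : Nat) : Int) := by push_cast; ring
    have ht2 : ((5*k : Nat) : Int) + 5 = ((5*k+5 : Nat) : Int) := by push_cast; ring
    rw [hs1, hs2, ht1, ht2, PySem.List.slice_natCast, PySem.List.slice_natCast]
    rw [show 5*k+10 - (5*k+5) = 5 from by omega, show 5*k+5 - 5*k = 5 from by omega]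
    rw [show 5*k+5 = (5*k)+1+1+1+1+1 from by omega]
    simp only [List.drop_succ_cons]

theorem a_step (a b c d e : Int) (t : List Int)
    (h : ∀ x ∈ a::b::c::d::e::t, 0 ≤ x ∧ x < 256) :
    decode (a::b::c::d::e::t) = blockVals a b c d e ++ decode t := by
  simp only [decode, List.length_cons]
  have hm2 : ((t.length + 1 + 1 + 1 + 1 + 1 : Nat) : Int) % 5 = ((t.length : Nat) : Int) % 5 := by
    push_cast; omega
  rw [hm2]
  by_cases hr : ((t.length : Nat) : Int) % 5 > 0
  · rw [if_pos hr, if_pos hr]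
    have hk : 0 < t.length % 5 := by omega
    have hneg : (0 : Int) - ((t.length : Nat) : Int) % 5 = -(((t.length % 5 : Nat)) : Int) := by
      push_cast; omega
    rw [hneg, PySem.List.slice_from_neg_natCast _ _ hk, PySem.List.slice_from_neg_natCast _ _ hk]
    have hlen5 : (a::b::c::d::e::t).length - t.length % 5 = (t.length - t.length % 5) + 1 + 1 + 1 + 1 + 1 := by
      simp; omega
    rw [hlen5]
    simp only [List.drop_succ_cons]
    rw [blockLoop_step a b c d e t h]
    rw [remLoop_append _ 0 0 (blockVals a b c d e ++ blockLoop t),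
        remLoop_append _ 0 0 (blockLoop t)]
    simp
  · rw [if_neg hr, if_neg hr]
    exact blockLoop_step a b c d e t h

theorem decode_eq_spec (bs : List Int) (h : ∀ x ∈ bs, 0 ≤ x ∧ x < 256) :
    decode bs = decodeSpec bs := by
  induction bs using decodeSpec.induct with
  | case1 a b c d e t ih =>
    rw [a_step a b c d e t h, decodeSpec, ih (fun y hy => h y (by simp [hy]))]
  | case2 t hne =>
    rcases t with _ | ⟨a, _ | ⟨b, _ | ⟨c, _ | ⟨d, _ | ⟨e, t⟩⟩⟩⟩⟩
    · simp [decode, decodeSpec, remVals, blockLoop, PySem.List.pyRange]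
    · have hbl : blockLoop [a] = [] := by norm_num [blockLoop, PySem.List.pyRange]
      simp [decode, decodeSpec, remVals, hbl, remLoop, drawchars,
            PySem.List.slice, PySem.List.clampIdx]
    · have ha := h a (by simp); have hb := h b (by simp)
      have hbl : blockLoop [a, b] = [] := by norm_num [blockLoop, PySem.List.pyRange]
      simp [decode, decodeSpec, remVals, hbl, remLoop, drawchars,
            PySem.List.slice, PySem.List.clampIdx]
      omega
    · have ha := h a (by simp); have hb := h b (by simp); have hc := h c (by simp)
      have hbl : blockLoop [a, b, c] = [] := by norm_num [blockLoop, PySem.List.pyRange]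
      simp [decode, decodeSpec, remVals, hbl, remLoop, drawchars,
            PySem.List.slice, PySem.List.clampIdx]
      omega
    · have ha := h a (by simp); have hb := h b (by simp); have hc := h c (by simp)
      have hd := h d (by simp)
      have hbl : blockLoop [a, b, c, d] = [] := by norm_num [blockLoop, PySem.List.pyRange]
      simp [decode, decodeSpec, remVals, hbl, remLoop, drawchars,
            PySem.List.slice, PySem.List.clampIdx]
      omega
    · exact absurd rfl (hne a b c d e t)

-- ===== VERDICT (by name: the statement is the Claim_ definition above) =====
theorem decode_spec : Claim_equal_decode := by
  intro s _ hpre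
  unfold Spec_decode
  rw [decode_eq_spec s hpre, decode_alt_eq_spec s hpre]
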